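-- pv_equiv track=rewrite | github.com/juandelima/Arkademy-Test | 3.py | divideAndSort
-- ===== SOURCE A (Python) =====
-- def divideAndSort(number):
--     number = str(number)
--     split = number.split('0')
--     result = []
--     for i in split:
--         createList = list(i)
--         result += sorted(createList)
--
--     return "".join(result)
-- ===== SOURCE B (Python) =====
-- def divideAndSort(number):
--     # One pass over str(number): counting sort per zero-delimited group,
--     # table over codes ord('-')..ord('9') (45..57), instead of split + sorted.
--     BASE = 45  # ord('-')
--     counts = [0] * 13
--     pieces = []
--     for ch in str(number):
--         if ch == '0':
--             for k in range(13):
--                 if counts[k]: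
--                     pieces.append(chr(BASE + k) * counts[k])
--                     counts[k] = 0
--         else:
--             counts[ord(ch) - BASE] += 1
--     for k in range(13):
--         if counts[k]:
--             pieces.append(chr(BASE + k) * counts[k])
--     return "".join(pieces)
-- ===== Notes on version B (the rewrite author's own statement) =====
-- stated objective: alternative
-- what changed: Replaces split('0') plus per-segment sorted() with a single pass over str(number) that maintains a small counting table over the codes of '-'..'9' and flushes it in ascending code order at each '0' and at the end.
import Mathlib
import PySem

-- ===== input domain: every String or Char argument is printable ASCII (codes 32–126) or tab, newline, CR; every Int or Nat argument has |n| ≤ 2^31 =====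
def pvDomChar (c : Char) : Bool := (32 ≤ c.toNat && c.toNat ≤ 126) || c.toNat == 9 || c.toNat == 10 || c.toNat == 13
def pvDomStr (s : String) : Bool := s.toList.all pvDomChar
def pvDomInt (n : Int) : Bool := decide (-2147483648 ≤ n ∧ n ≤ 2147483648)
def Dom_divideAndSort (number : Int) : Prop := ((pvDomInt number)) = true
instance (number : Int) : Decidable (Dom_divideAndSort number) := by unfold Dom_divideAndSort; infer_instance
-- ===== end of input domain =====

-- B replaces A's split-then-sorted() with a single pass over str(number) using a
-- per-group counting table over the codes '-'..'9' (45..57); objective: alternative.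

-- ===== PORT A =====
-- Python A: stringify, split on '0', sort each piece with sorted(), concatenate.
def divideAndSort (number : Int) : String :=
  let s := PySem.Int.toStr number
  match PySem.Str.split? s "0" with
  | none => ""   -- unreachable: str.split raises only for an empty separator, and the separator is "0"
  | some split =>
      let result : List Char :=
        split.foldl (fun result i => result ++ PySem.List.sorted i.toList (fun c => c) false) []
      PySem.Str.join "" (result.map (fun c => String.ofList [c]))

-- ===== PORT B =====
-- flush: emit the pending group's characters in ascending code order (Source B's inner `for k ...` loop)
def pvFlush (counts : List Nat) (pieces : List (List Char)) : List (List Char) :=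
  (List.range 13).foldl
    (fun ps k =>
      if counts.getD k 0 != 0 then
        ps ++ [List.replicate (counts.getD k 0) (Char.ofNat (45 + k))]
      else ps)
    pieces

def divideAndSort_alt (number : Int) : String :=
  let st :=
    (PySem.Int.toStr number).toList.foldl
      (fun (st : List Nat × List (List Char)) ch =>
        if ch = '0' then (List.replicate 13 0, pvFlush st.1 st.2)
        else (st.1.modify (ch.toNat - 45) (· + 1), st.2))
      (List.replicate 13 0, [])
  PySem.Str.join "" ((pvFlush st.1 st.2).map String.ofList)

-- ===== PRECONDITION & SPEC =====
def Spec_divideAndSort (number : Int) (out : String) : Prop := out = divideAndSort_alt number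
instance (number : Int) (out : String) : Decidable (Spec_divideAndSort number out) := by unfold Spec_divideAndSort; infer_instance

-- ===== CLAIM (what is proved, stated in full; the proofs are below) =====
def Claim_equal_divideAndSort : Prop := ∀ (number : Int), Dom_divideAndSort number → Spec_divideAndSort number (divideAndSort number)

-- ===== LEMMAS AND PROOFS =====

-- abbreviations used only by the proofs
def pvBlt : Char → Char → Bool := fun a b => decide (a < b)
def pvSortedId (cs : List Char) : List Char := PySem.List.sorted cs (fun c => c) false
def pvBump (counts : List Nat) (c : Char) : List Nat := counts.modify (c.toNat - 45) (· + 1)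
def pvCounts (seg : List Char) : List Nat := seg.foldl pvBump (List.replicate 13 0)
def pvChunk (counts : List Nat) (k : Nat) : List Char :=
  List.replicate (counts.getD k 0) (Char.ofNat (45 + k))
def pvEmitK (ks : List Nat) (counts : List Nat) : List Char := (ks.map (pvChunk counts)).flatten
def pvGood (c : Char) : Prop := 45 ≤ c.toNat ∧ c.toNat ≤ 57

-- the zero-delimited groups of a character list ('pre' is the group being read)
def pvSegs (pre : List Char) : List Char → List (List Char)
  | [] => [pre]
  | c :: rest => if c = '0' then pre :: pvSegs [] rest else pvSegs (pre ++ [c]) rest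

def pvStep : (List Nat × List (List Char)) → Char → (List Nat × List (List Char)) :=
  fun st ch =>
    if ch = '0' then (List.replicate 13 0, pvFlush st.1 st.2)
    else (st.1.modify (ch.toNat - 45) (· + 1), st.2)

-- ---- A-side: characterise split('0') and the sorted-concatenation ----

theorem pv_go_eq_segs : ∀ (fuel : Nat) (l cur : List Char) (acc : List (List Char)), l.length < fuel →
    PySem.Chars.splitOn.go ['0'] fuel l cur acc = acc.reverse ++ pvSegs cur.reverse l := by
  intro fuel
  induction fuel with
  | zero => intro l cur acc h; omega
  | succ f ih =>
    intro l cur acc h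
    cases l with
    | nil => simp [PySem.Chars.splitOn.go, pvSegs]
    | cons c rest =>
      by_cases hc : c = '0'
      · subst hc
        rw [show PySem.Chars.splitOn.go ['0'] (f+1) ('0'::rest) cur acc
            = PySem.Chars.splitOn.go ['0'] f rest [] (cur.reverse :: acc) by
          simp [PySem.Chars.splitOn.go, List.isPrefixOf]]
        rw [ih rest [] (cur.reverse :: acc) (by simpa using Nat.lt_of_succ_lt_succ h)]
        simp [pvSegs]
      · rw [show PySem.Chars.splitOn.go ['0'] (f+1) (c::rest) cur acc
            = PySem.Chars.splitOn.go ['0'] f rest (c :: cur) acc by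
          simp [PySem.Chars.splitOn.go, List.isPrefixOf]
          exact fun h => absurd h.symm hc]
        rw [ih rest (c :: cur) acc (by simpa using Nat.lt_of_succ_lt_succ h)]
        simp [pvSegs, hc]

theorem pv_splitOn_eq (l : List Char) : PySem.Chars.splitOn l ['0'] = pvSegs [] l := by
  rw [PySem.Chars.splitOn, pv_go_eq_segs (l.length + 1) l [] [] (by omega)]
  simp

theorem pv_join_nil (parts : List (List Char)) : PySem.Chars.join [] parts = parts.flatten := by
  induction parts with
  | nil => rfl
  | cons p ps ih => simp [PySem.Chars.join, List.intercalate] at ih ⊢; cases ps <;> simp_all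

theorem pv_flatten_singletons (l : List (List Char)) (g : List Char → List Char) :
    ((l.map (fun x => (g x).map (fun c => [c]))).flatten).flatten = (l.map g).flatten := by
  induction l with
  | nil => rfl
  | cons a t ih =>
    simp_all
    induction (g a) with
    | nil => rfl
    | cons c cs ihc => simp_all

theorem pv_A_toList (n : Int) :
    (divideAndSort n).toList = ((pvSegs [] (PySem.Int.toChars n)).map pvSortedId).flatten := by
  simp only [divideAndSort]
  rw [show PySem.Str.split? (PySem.Int.toStr n) "0"
      = some ((pvSegs [] (PySem.Int.toChars n)).map String.ofList) from by
    rw [PySem.Str.split?, show ("0" : String).toList = ['0'] from by decide,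
        PySem.Chars.split?]
    simp [pv_splitOn_eq, PySem.Int.toList_toStr]]
  simp only []
  rw [PySem.List.foldl_append_eq_flatMap]
  rw [PySem.Str.toList_join]
  simp [pv_join_nil, List.flatMap_def, List.map_map, Function.comp_def]
  exact pv_flatten_singletons _ pvSortedId

-- ---- B-side: character/table facts ----

theorem pv_toNat_ofNat {m : Nat} (h : m ≤ 57) : (Char.ofNat m).toNat = m := by
  rw [Char.toNat_ofNat]
  have : m.isValidChar := Or.inl (by omega)
  simp [this]

theorem pv_ofNat_idx {c : Char} (h : pvGood c) : Char.ofNat (45 + (c.toNat - 45)) = c := by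
  obtain ⟨h1, h2⟩ := h
  have : 45 + (c.toNat - 45) = c.toNat := by omega
  rw [this, Char.ofNat_toNat]

theorem pv_lt_toNat (a b : Char) : a < b ↔ a.toNat < b.toNat :=
  Char.lt_def.trans UInt32.lt_iff_toNat_lt

theorem pv_getD_bump_ne (counts : List Nat) (c : Char) {j : Nat} (h : j ≠ c.toNat - 45) :
    (pvBump counts c).getD j 0 = counts.getD j 0 := by
  simp [pvBump, List.getD_eq_getElem?_getD, h.symm]

theorem pv_getD_bump_self (counts : List Nat) (c : Char) (hlen : counts.length = 13)
    (hg : pvGood c) : (pvBump counts c).getD (c.toNat - 45) 0 = counts.getD (c.toNat - 45) 0 + 1 := by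
  obtain ⟨h1, h2⟩ := hg
  have hidx : c.toNat - 45 < counts.length := by omega
  simp [pvBump, List.getD_eq_getElem?_getD, List.getElem?_eq_getElem hidx]

theorem pv_insert_replicate (n : Nat) (x : Char) (R : List Char) :
    PySem.List.insertBy pvBlt x (List.replicate n x ++ R)
      = List.replicate n x ++ PySem.List.insertBy pvBlt x R := by
  induction n with
  | zero => simp
  | succ m ih => simp [List.replicate_succ, PySem.List.insertBy, pvBlt, ih]

theorem pv_insert_front (R : List Char) (x : Char) (h : ∀ y ∈ R, pvBlt x y = true) :
    PySem.List.insertBy pvBlt x R = x :: R := by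
  cases R with
  | nil => rfl
  | cons y ys => simp [PySem.List.insertBy, h y (by simp)]

theorem pv_insert_skip (P T : List Char) (x : Char) (h : ∀ y ∈ P, pvBlt x y = false) :
    PySem.List.insertBy pvBlt x (P ++ T) = P ++ PySem.List.insertBy pvBlt x T := by
  induction P with
  | nil => rfl
  | cons y ys ih =>
    simp [PySem.List.insertBy, h y (by simp)]
    exact ih (fun z hz => h z (by simp [hz]))

theorem pv_mem_emitK {ks counts : List Nat} {y : Char} (h : y ∈ pvEmitK ks counts) :
    ∃ k ∈ ks, y = Char.ofNat (45 + k) := by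
  simp [pvEmitK, pvChunk] at h
  obtain ⟨k, hk, hy⟩ := h
  exact ⟨k, hk, hy.2⟩

theorem pv_emitK_congr {ks counts counts' : List Nat}
    (h : ∀ k ∈ ks, counts.getD k 0 = counts'.getD k 0) :
    pvEmitK ks counts = pvEmitK ks counts' := by
  unfold pvEmitK
  congr 1
  exact List.map_congr_left (fun k hk => by
    have := h k hk
    simp [List.getD_eq_getElem?_getD] at this
    simp [pvChunk, List.getD_eq_getElem?_getD, this])

-- bumping one character's counter turns the emitted string into an ordered insertion
theorem pv_insk : ∀ (ks counts : List Nat) (c : Char), pvGood c →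
    (∀ k ∈ ks, k < 13) → ks.Pairwise (· < ·) → (c.toNat - 45) ∈ ks → counts.length = 13 →
    pvEmitK ks (pvBump counts c) = PySem.List.insertBy pvBlt c (pvEmitK ks counts) := by
  intro ks
  induction ks with
  | nil => intro counts c _ _ _ hmem _; simp at hmem
  | cons k rest ih =>
    intro counts c hg hlt hpw hmem hlen
    have hpw' := (List.pairwise_cons.mp hpw).1
    have hEcons : ∀ cs, pvEmitK (k :: rest) cs = pvChunk cs k ++ pvEmitK rest cs := by
      intro cs; simp [pvEmitK]
    rw [hEcons, hEcons]
    by_cases hk : k = c.toNat - 45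
    · have hrest : pvEmitK rest (pvBump counts c) = pvEmitK rest counts := by
        apply pv_emitK_congr
        intro j hj
        exact pv_getD_bump_ne counts c (by have := hpw' j hj; omega)
      have hc : Char.ofNat (45 + k) = c := by rw [hk]; exact pv_ofNat_idx hg
      have hchunk : pvChunk (pvBump counts c) k
          = List.replicate (counts.getD k 0 + 1) c := by
        rw [pvChunk, hc, hk, pv_getD_bump_self counts c hlen hg]
      rw [hchunk, hrest, pvChunk, hc]
      rw [pv_insert_replicate]
      rw [pv_insert_front _ _ (by
        intro y hy
        obtain ⟨j, hj, rfl⟩ := pv_mem_emitK hy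
        have hjlt := hpw' j hj
        have hj13 := hlt j (by simp [hj])
        simp only [pvBlt, decide_eq_true_eq]
        rw [pv_lt_toNat, pv_toNat_ofNat (by omega)]
        obtain ⟨h1, h2⟩ := hg
        omega)]
      rw [List.replicate_succ', List.append_assoc]
      rfl
    · have hmem' : c.toNat - 45 ∈ rest := by
        rcases List.mem_cons.mp hmem with h | h
        · exact absurd h.symm hk
        · exact h
      have hklt : k < c.toNat - 45 := hpw' _ hmem'
      have hchunk : pvChunk (pvBump counts c) k = pvChunk counts k := by
        rw [pvChunk, pvChunk, pv_getD_bump_ne counts c (Ne.symm (by omega))]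
      rw [hchunk]
      rw [pv_insert_skip _ _ _ (by
        intro y hy
        have hy' := List.eq_of_mem_replicate hy
        subst hy'
        have hk13 := hlt k (by simp)
        simp only [pvBlt, decide_eq_false_iff_not]
        rw [pv_lt_toNat, pv_toNat_ofNat (by omega)]
        obtain ⟨h1, h2⟩ := hg
        omega)]
      rw [ih counts c hg (fun j hj => hlt j (by simp [hj])) (List.pairwise_cons.mp hpw).2 hmem' hlen]

theorem pv_emitinv (seg : List Char) : ∀ (counts : List Nat) (acc : List Char),
    counts.length = 13 → (∀ c ∈ seg, pvGood c) →
    pvEmitK (List.range 13) counts = acc →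
    pvEmitK (List.range 13) (seg.foldl pvBump counts)
      = seg.foldl (fun a x => PySem.List.insertBy pvBlt x a) acc := by
  induction seg with
  | nil => intro counts acc _ _ h; simpa using h
  | cons c t ih =>
    intro counts acc hlen hg h
    rw [List.foldl_cons, List.foldl_cons]
    apply ih (pvBump counts c) _ (by rw [pvBump, List.length_modify, hlen])
      (fun x hx => hg x (by simp [hx]))
    rw [pv_insk (List.range 13) counts c (hg c (by simp)) (by simp)
      (List.pairwise_lt_range) (by simp [List.mem_range]; have := hg c (by simp); obtain ⟨h1,h2⟩ := this; omega) hlen, h]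

-- the counting table of one group, emitted in code order, is sorted() of that group
theorem pv_emit_sorted (seg : List Char) (hg : ∀ c ∈ seg, pvGood c) :
    pvEmitK (List.range 13) (pvCounts seg) = pvSortedId seg := by
  rw [pvCounts, pv_emitinv seg (List.replicate 13 0) [] (by simp) hg (by decide)]
  rw [pvSortedId, PySem.List.sorted_eq_foldl_insertBy]
  rfl

theorem pv_flatten_filter {α : Type} (p : α → Bool) (f : α → List Char) (l : List α)
    (h : ∀ x ∈ l, p x = false → f x = []) :
    ((l.filter p).map f).flatten = (l.map f).flatten := by
  induction l with
  | nil => rfl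
  | cons a t ih =>
    by_cases hp : p a = true
    · simp [hp, ih (fun x hx => h x (by simp [hx]))]
    · simp only [Bool.not_eq_true] at hp
      simp [hp, h a (by simp) hp, ih (fun x hx => h x (by simp [hx]))]

theorem pv_flush_flatten (counts : List Nat) (pieces : List (List Char)) :
    (pvFlush counts pieces).flatten = pieces.flatten ++ pvEmitK (List.range 13) counts := by
  rw [pvFlush, PySem.List.foldl_append_if (fun k => counts.getD k 0 != 0)
    (fun k => List.replicate (counts.getD k 0) (Char.ofNat (45 + k)))]
  rw [List.flatten_append, pvEmitK]
  congr 1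
  apply pv_flatten_filter
  intro k _ hk
  simp at hk
  simp [hk]

-- the one-pass loop of B produces exactly the sorted groups, in order
theorem pv_main (l : List Char) : ∀ (seg : List Char) (pieces : List (List Char)),
    (∀ c ∈ seg, pvGood c) → (∀ c ∈ l, pvGood c) →
    (pvFlush (l.foldl pvStep (pvCounts seg, pieces)).1
             (l.foldl pvStep (pvCounts seg, pieces)).2).flatten
    = pieces.flatten ++ ((pvSegs seg l).map pvSortedId).flatten := by
  induction l with
  | nil =>
    intro seg pieces hseg _
    simp only [List.foldl_nil, pvSegs]
    rw [pv_flush_flatten, pv_emit_sorted seg hseg]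
    simp
  | cons c t ih =>
    intro seg pieces hseg hl
    by_cases hc : c = '0'
    · subst hc
      simp only [List.foldl_cons, pvStep]
      rw [if_pos (by trivial)]
      have h0 : (List.replicate 13 0 : List Nat) = pvCounts [] := rfl
      rw [h0]
      rw [ih [] (pvFlush (pvCounts seg) pieces) (by simp) (fun x hx => hl x (by simp [hx]))]
      rw [pv_flush_flatten, pv_emit_sorted seg hseg]
      simp [pvSegs]
    · simp only [List.foldl_cons, pvStep, if_neg hc]
      have hb : (pvCounts seg).modify (c.toNat - 45) (· + 1) = pvCounts (seg ++ [c]) := by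
        rw [pvCounts, pvCounts, List.foldl_append]; rfl
      rw [hb]
      rw [ih (seg ++ [c]) pieces
        (by intro x hx; rcases List.mem_append.mp hx with h | h
            · exact hseg x h
            · simp at h; subst h; exact hl x (by simp))
        (fun x hx => hl x (by simp [hx]))]
      simp [pvSegs, hc]

theorem pv_good_toChars (n : Int) : ∀ c ∈ PySem.Int.toChars n, pvGood c := by
  intro c hc
  have hdig : ∀ m : Nat, c ∈ Nat.toDigits 10 m → pvGood c := by
    intro m hm
    have h := Nat.isDigit_of_mem_toDigits (by norm_num) (le_refl 10) hm
    simp [Char.isDigit] at h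
    have h1 := UInt32.le_iff_toNat_le.mp h.1
    have h2 := UInt32.le_iff_toNat_le.mp h.2
    have e1 : (48 : UInt32).toNat = 48 := rfl
    have e2 : (57 : UInt32).toNat = 57 := rfl
    have e3 : c.toNat = c.val.toNat := rfl
    exact ⟨by omega, by omega⟩
  rw [PySem.Int.toChars] at hc
  by_cases hn : n < 0
  · rw [if_pos hn] at hc
    rcases List.mem_cons.mp hc with h | h
    · subst h; exact ⟨by decide, by decide⟩
    · exact hdig _ h
  · rw [if_neg hn] at hc
    exact hdig _ hc

theorem pv_B_toList (n : Int) :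
    (divideAndSort_alt n).toList =
      ((pvSegs [] (PySem.Int.toChars n)).map pvSortedId).flatten := by
  simp only [divideAndSort_alt]
  rw [PySem.Str.toList_join]
  simp only [List.map_map, Function.comp_def, String.toList_ofList]
  rw [show (fun (x : List Char) => x) = id from rfl]
  simp only [List.map_id]
  rw [show ("" : String).toList = [] from rfl, pv_join_nil]
  have := pv_main (PySem.Int.toStr n).toList [] [] (by simp) (by
    rw [PySem.Int.toList_toStr]; exact pv_good_toChars n)
  simp only [pvCounts, List.foldl_nil] at this
  rw [PySem.Int.toList_toStr] at this
  simpa using this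

-- ===== VERDICT (by name: the statement is the Claim_ definition above) =====
theorem divideAndSort_spec : Claim_equal_divideAndSort := by
  intro n _
  unfold Spec_divideAndSort
  rw [← String.toList_inj, pv_A_toList, pv_B_toList]
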